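-- pv_equiv track=rewrite | github.com/gabbyevaristo/algo-practice | stacks/stackpractice2.py | deleteConsecutiveWords
-- ===== SOURCE A (Python) =====
-- def deleteConsecutiveWords(seq):
--     s = []
--
--     for i in range(len(seq)):
--         if not s:                   # Add value to stack is stack is empty
--             s.append(seq[i])
--         else:
--             if seq[i] == s[-1]:     # If stack exists and consecutive words are the same,
--                 s.pop()             # pop the value off the stack
--             else:
--                 s.append(seq[i])
--     return len(s)
-- ===== SOURCE B (Python) =====
-- def deleteConsecutiveWords(seq):
--     cur = list(seq)
--     changed = True
--     while changed:
--         changed = False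
--         out = []
--         i = 0
--         while i < len(cur):
--             if i + 1 < len(cur) and cur[i] == cur[i + 1]:
--                 i += 2
--                 changed = True
--             else:
--                 out.append(cur[i])
--                 i += 1
--         cur = out
--     return len(cur)
-- ===== Notes on version B (the rewrite author's own statement) =====
-- stated objective: alternative
-- what changed: Replaces the single-pass stack with repeated left-to-right passes that each remove non-overlapping adjacent equal pairs, iterated to a fixed point; equivalence rests on confluence of adjacent-pair cancellation.
import Mathlib
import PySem

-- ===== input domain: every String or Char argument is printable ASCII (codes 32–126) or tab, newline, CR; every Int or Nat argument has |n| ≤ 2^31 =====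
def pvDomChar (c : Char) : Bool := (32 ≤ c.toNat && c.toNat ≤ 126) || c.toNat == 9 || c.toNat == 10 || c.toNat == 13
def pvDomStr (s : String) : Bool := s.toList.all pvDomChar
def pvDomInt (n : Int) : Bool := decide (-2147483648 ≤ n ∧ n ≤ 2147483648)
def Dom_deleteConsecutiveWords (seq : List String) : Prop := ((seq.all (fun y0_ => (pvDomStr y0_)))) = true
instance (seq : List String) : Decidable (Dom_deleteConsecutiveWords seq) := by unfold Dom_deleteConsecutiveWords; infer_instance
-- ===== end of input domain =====

-- B replaces A's one stack pass by repeated adjacent-pair-removal passes iterated to a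
-- fixed point (alternative decomposition, not faster); equivalence = confluence of cancellation.

-- ===== PORT A =====
-- stack step of A's loop body: push if stack empty; pop if equal to top (s[-1] = last), else push
def stepA (s : List String) (x : String) : List String :=
  if s = [] then s ++ [x]
  else if s.getLast? = some x then s.dropLast
  else s ++ [x]

def deleteConsecutiveWords (seq : List String) : Int :=
  ((seq.foldl stepA []).length : Int)

-- ===== PORT B =====
-- one pass of Source B's inner while-loop: remove non-overlapping adjacent equal pairs, left to right
def passB : List String → List String
  | x :: y :: rest => if x = y then passB rest else x :: passB (y :: rest)
  | [x] => [x]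
  | [] => []

theorem passB_length_le : ∀ l : List String, (passB l).length ≤ l.length := by
  intro l
  induction l using passB.induct with
  | case1 y rest ih => simp only [passB]; simp; omega
  | case2 x y rest hxy ih => simp only [passB, if_neg hxy]; simpa using ih
  | case3 x => simp [passB]
  | case4 => simp [passB]

theorem passB_lt (l : List String) (h : passB l ≠ l) : (passB l).length < l.length := by
  induction l using passB.induct with
  | case1 y rest ih =>
      simp only [passB]
      have := passB_length_le rest; simp; omega
  | case2 x y rest hxy ih =>
      simp only [passB, if_neg hxy] at h ⊢
      have h' : passB (y :: rest) ≠ y :: rest := by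
        intro he; exact h (by rw [he])
      have := ih h'; simpa using this
  | case3 x => simp [passB] at h
  | case4 => simp [passB] at h

-- outer while-loop of Source B: iterate passes until a pass removes nothing
def loopB (l : List String) : List String :=
  if h : passB l = l then l else loopB (passB l)
termination_by l.length
decreasing_by exact passB_lt l h

def deleteConsecutiveWords_alt (seq : List String) : Int :=
  ((loopB seq).length : Int)

-- ===== PRECONDITION & SPEC =====
def Spec_deleteConsecutiveWords (seq : List String) (out : Int) : Prop := out = deleteConsecutiveWords_alt seq
instance (seq : List String) (out : Int) : Decidable (Spec_deleteConsecutiveWords seq out) := by unfold Spec_deleteConsecutiveWords; infer_instance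

-- ===== CLAIM (what is proved, stated in full; the proofs are below) =====
def Claim_equal_deleteConsecutiveWords : Prop := ∀ (seq : List String), Dom_deleteConsecutiveWords seq → Spec_deleteConsecutiveWords seq (deleteConsecutiveWords seq)

-- ===== LEMMAS AND PROOFS =====

-- Head-as-top version of A's stack step (A keeps the top at the end of the list).
def rcons (s : List String) (x : String) : List String :=
  match s with
  | h :: t => if x = h then t else x :: h :: t
  | [] => [x]

theorem stepA_rev (s : List String) (x : String) :
    (stepA s x).reverse = rcons s.reverse x := by
  rcases s.eq_nil_or_concat with rfl | ⟨t, a, rfl⟩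
  · simp [stepA, rcons]
  · by_cases hax : a = x
    · subst hax
      simp [stepA, rcons]
    · have hax' : ¬ x = a := fun h => hax h.symm
      simp [stepA, rcons, hax, hax']

theorem foldA_rev : ∀ (l s : List String),
    (List.foldl stepA s l).reverse = List.foldl rcons s.reverse l := by
  intro l
  induction l with
  | nil => intro s; simp
  | cons x xs ih =>
      intro s
      simp only [List.foldl_cons]
      rw [ih, stepA_rev]

theorem rcons_chain {s : List String} (hs : s.IsChain (· ≠ ·)) (x : String) :
    (rcons s x).IsChain (· ≠ ·) := by
  cases s with
  | nil => simp [rcons]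
  | cons h t =>
      by_cases hx : x = h
      · simp only [rcons, if_pos hx]
        exact hs.tail
      · simp only [rcons, if_neg hx]
        exact List.isChain_cons_cons.mpr ⟨hx, hs⟩

theorem rcons_cancel {s : List String} (hs : s.IsChain (· ≠ ·)) (x : String) :
    rcons (rcons s x) x = s := by
  cases s with
  | nil => simp [rcons]
  | cons h t =>
      by_cases hx : x = h
      · simp only [rcons, if_pos hx]
        cases t with
        | nil => simp [rcons, hx]
        | cons h2 t2 =>
            have hne : h ≠ h2 := (List.isChain_cons_cons.mp hs).1
            subst hx
            simp [rcons, hne]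
      · simp [rcons, hx]

theorem pass_fold (l : List String) : ∀ s : List String, s.IsChain (· ≠ ·) →
    List.foldl rcons s (passB l) = List.foldl rcons s l := by
  induction l using passB.induct with
  | case1 y rest ih =>
      intro s hs
      simp only [passB, if_true, List.foldl_cons]
      rw [ih s hs, rcons_cancel hs]
  | case2 x y rest hxy ih =>
      intro s hs
      simp only [passB, if_neg hxy, List.foldl_cons]
      exact ih (rcons s x) (rcons_chain hs x)
  | case3 x => intro s _; simp [passB]
  | case4 => intro s _; simp [passB]

theorem chain_of_fix (l : List String) (h : passB l = l) : l.IsChain (· ≠ ·) := by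
  induction l using passB.induct with
  | case1 y rest ih =>
      exfalso
      simp only [passB] at h
      have h1 := passB_length_le rest
      have h2 := congrArg List.length h
      simp at h2; omega
  | case2 x y rest hxy ih =>
      simp only [passB, if_neg hxy] at h
      have h' : passB (y :: rest) = y :: rest := by
        injection h
      exact List.isChain_cons_cons.mpr ⟨hxy, ih h'⟩
  | case3 x => simp
  | case4 => simp

theorem loop_fix (l : List String) : passB (loopB l) = loopB l := by
  induction l using loopB.induct with
  | case1 l h => rw [loopB, dif_pos h]; exact h
  | case2 l h ih => rw [loopB, dif_neg h]; exact ih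

theorem loop_fold (l : List String) :
    List.foldl rcons [] (loopB l) = List.foldl rcons [] l := by
  induction l using loopB.induct with
  | case1 l h => rw [loopB, dif_pos h]
  | case2 l h ih =>
      rw [loopB, dif_neg h, ih, pass_fold l [] (by simp)]

theorem chain_fold_push : ∀ (l : List String) (a : String) (s : List String),
    (a :: l).IsChain (· ≠ ·) →
    List.foldl rcons (a :: s) l = l.reverse ++ a :: s := by
  intro l
  induction l with
  | nil => intro a s _; simp
  | cons b l' ih =>
      intro a s hc
      have hba : ¬ b = a := fun he => (List.isChain_cons_cons.mp hc).1 he.symm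
      simp only [List.foldl_cons, rcons, if_neg hba]
      rw [ih b (a :: s) hc.tail]
      simp

theorem chain_fold_length (l : List String) (hc : l.IsChain (· ≠ ·)) :
    (List.foldl rcons [] l).length = l.length := by
  cases l with
  | nil => simp
  | cons a l' =>
      have h : List.foldl rcons [] (a :: l') = l'.reverse ++ [a] := by
        simp only [List.foldl_cons, rcons]
        exact chain_fold_push l' a [] hc
      rw [h]; simp

-- ===== VERDICT (by name: the statement is the Claim_ definition above) =====
theorem deleteConsecutiveWords_spec : Claim_equal_deleteConsecutiveWords := by
  intro seq _
  unfold Spec_deleteConsecutiveWords deleteConsecutiveWords deleteConsecutiveWords_alt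
  have h1 : (List.foldl stepA [] seq).length = (List.foldl rcons [] seq).length := by
    have h := foldA_rev seq []
    simp only [List.reverse_nil] at h
    rw [← h, List.length_reverse]
  have h2 : (List.foldl rcons [] (loopB seq)).length = (loopB seq).length :=
    chain_fold_length _ (chain_of_fix _ (loop_fix seq))
  rw [h1, ← loop_fold seq, h2]
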